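-- pv_equiv track=rewrite | github.com/nothingspare/MobileSampleSDKs | pythonGen/CustomersLib/APIHelper.py | appendUrlWithQueryParameters
-- ===== SOURCE A (Python) =====
-- def appendUrlWithQueryParameters(url, parameters ):
--     '''
--     Appends the given set of parameters to the given query string
--
--     :param url: The query url string to append the parameters
--     :type url: str
--     :param parameters:The parameters to append
--     :type parameters: dictionary
--     :return: Url with appended query parameters
--     :rtype: str
--     '''
--
--     #perform parameter validation
--     if url is None:
--         raise ValueError("url is null")
--     if parameters is None:
--         return url
--
--     #does the query string already has parameters
--     hasParams = '?' in url
--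
--     #iterate and replace parameters
--     for key in parameters:
--
--         #ignore null values
--         if parameters[key] is None:
--             continue
--
--         #if already has parameters, use the &amp; to append new parameters
--         separator = '&' if hasParams else '?'
--
--         url = url+'{0}{1}={2}'.format(separator,key,str(parameters[key]))
--
--         #indicate the url has params
--         hasParams=True
--
--
--     return url
-- ===== SOURCE B (Python) =====
-- def appendUrlWithQueryParameters(url, parameters):
--     '''
--     Appends the given set of parameters to the given query string
--     (filter-and-join decomposition instead of threaded loop state)
--     '''
--     if url is None:
--         raise ValueError("url is null")
--     if parameters is None:
--         return url
--     parts = ["{0}={1}".format(key, str(value))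
--              for key, value in parameters.items() if value is not None]
--     if not parts:
--         return url
--     connector = '&' if '?' in url else '?'
--     return url + connector + '&'.join(parts)
-- ===== Notes on version B (the rewrite author's own statement) =====
-- stated objective: simpler
-- what changed: Replaces the loop that threads a hasParams flag and re-concatenates the url per key with a filtered key=value list, a connector computed once, and a single '&'.join; Pre_ excludes association lists with duplicate keys, which cannot arise from a Python dict (A re-looks up each key, B uses each pair's own value).
import Mathlib
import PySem

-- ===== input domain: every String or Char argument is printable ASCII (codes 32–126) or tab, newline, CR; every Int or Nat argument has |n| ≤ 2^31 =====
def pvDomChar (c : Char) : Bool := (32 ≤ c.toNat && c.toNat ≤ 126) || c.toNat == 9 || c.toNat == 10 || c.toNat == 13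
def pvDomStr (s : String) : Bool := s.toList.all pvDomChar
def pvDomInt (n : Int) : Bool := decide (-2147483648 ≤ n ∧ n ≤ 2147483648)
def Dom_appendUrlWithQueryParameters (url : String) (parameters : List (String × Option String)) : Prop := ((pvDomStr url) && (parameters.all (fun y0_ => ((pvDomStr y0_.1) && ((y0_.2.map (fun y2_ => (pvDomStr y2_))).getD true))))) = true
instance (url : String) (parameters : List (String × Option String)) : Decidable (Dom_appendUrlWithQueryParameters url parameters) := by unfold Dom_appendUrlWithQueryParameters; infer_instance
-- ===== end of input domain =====

-- B changes A's structure only (filter + single join instead of a flag-threading loop); the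
-- return values are proved equal on every dict-shaped input (keys without duplicates).

-- ===== PORT A =====
-- the 'for key in parameters' loop: iterate the dict's keys, look each value up by key
def pvALoop (d : PySem.Dict String (Option String)) (keys : List String)
    (url : String) (hasParams : Bool) : String :=
  match keys with
  | [] => url
  | k :: ks =>
    match d.get? k with
    | some (some v) =>
        -- url = url + '{0}{1}={2}'.format(separator, key, str(parameters[key])); hasParams = True
        pvALoop d ks (url ++ (if hasParams then "&" else "?") ++ k ++ "=" ++ v) true
    | _ =>
        -- value is None (continue); (get? = none cannot occur: ks are d's own keys)
        pvALoop d ks url hasParams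

def appendUrlWithQueryParameters (url : String) (parameters : List (String × Option String)) : String :=
  let d : PySem.Dict String (Option String) := PySem.Dict.mk parameters
  let hasParams := PySem.Str.isIn "?" url
  pvALoop d d.keys url hasParams

-- ===== PORT B =====
def appendUrlWithQueryParameters_alt (url : String) (parameters : List (String × Option String)) : String :=
  let parts := parameters.filterMap (fun kv => kv.2.map (fun v => kv.1 ++ "=" ++ v))
  match parts with
  | [] => url
  | _ :: _ =>
    let connector := if PySem.Str.isIn "?" url then "&" else "?"
    url ++ connector ++ PySem.Str.join "&" parts

-- ===== PRECONDITION & SPEC =====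
-- Pre_ excludes association lists with duplicate keys: a Python dict can never contain them,
-- and on such lists A's port (first-match lookup per key) and B's (each pair's own value) are
-- both accidental readings of an input that does not correspond to any Python value.
def Pre_appendUrlWithQueryParameters (url : String) (parameters : List (String × Option String)) : Prop :=
  (parameters.map Prod.fst).Nodup

instance (url : String) (parameters : List (String × Option String)) : Decidable (Pre_appendUrlWithQueryParameters url parameters) := by unfold Pre_appendUrlWithQueryParameters; infer_instance

def pvWitness_appendUrlWithQueryParameters : String × (List (String × Option String)) :=
  ("http://x/y", [("a", some "1"), ("b", none), ("c", some "2")])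

def Spec_appendUrlWithQueryParameters (url : String) (parameters : List (String × Option String)) (out : String) : Prop := out = appendUrlWithQueryParameters_alt url parameters
instance (url : String) (parameters : List (String × Option String)) (out : String) : Decidable (Spec_appendUrlWithQueryParameters url parameters out) := by unfold Spec_appendUrlWithQueryParameters; infer_instance

-- ===== CLAIM (what is proved, stated in full; the proofs are below) =====
def Claim_equal_appendUrlWithQueryParameters : Prop := ∀ (url : String) (parameters : List (String × Option String)), Dom_appendUrlWithQueryParameters url parameters → Pre_appendUrlWithQueryParameters url parameters → Spec_appendUrlWithQueryParameters url parameters (appendUrlWithQueryParameters url parameters)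

-- ===== LEMMAS AND PROOFS =====

-- A's loop with the dict lookups resolved to each pair's own value (valid when keys are unique)
def pvPairLoop : List (String × Option String) → String → Bool → String
  | [], url, _ => url
  | (k, some v) :: rest, url, hasParams =>
      pvPairLoop rest (url ++ (if hasParams then "&" else "?") ++ k ++ "=" ++ v) true
  | (_, none) :: rest, url, hasParams => pvPairLoop rest url hasParams

-- B's parts, each prefixed by '&'
def pvAmp : List String → String
  | [] => ""
  | p :: rest => "&" ++ p ++ pvAmp rest

theorem pvALoop_congr (d d' : PySem.Dict String (Option String)) (ks : List String)
    (url : String) (b : Bool) (h : ∀ k ∈ ks, d.get? k = d'.get? k) :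
    pvALoop d ks url b = pvALoop d' ks url b := by
  induction ks generalizing url b with
  | nil => rfl
  | cons k ks ih =>
    have hk := h k (by simp)
    have hrest : ∀ k' ∈ ks, d.get? k' = d'.get? k' := fun k' hm => h k' (by simp [hm])
    simp only [pvALoop, hk]
    cases d'.get? k with
    | none => exact ih _ _ hrest
    | some v => cases v with
      | none => exact ih _ _ hrest
      | some s => exact ih _ _ hrest

theorem pvALoop_eq_pairLoop (ps : List (String × Option String)) (url : String) (b : Bool)
    (hnd : (ps.map Prod.fst).Nodup) :
    pvALoop (PySem.Dict.mk ps) (PySem.Dict.mk ps).keys url b = pvPairLoop ps url b := by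
  induction ps generalizing url b with
  | nil => rfl
  | cons kv rest ih =>
    obtain ⟨k, v⟩ := kv
    simp only [List.map_cons, List.nodup_cons] at hnd
    obtain ⟨hk, hnd'⟩ := hnd
    have hkeys : (PySem.Dict.mk ((k, v) :: rest)).keys = k :: (PySem.Dict.mk rest).keys := rfl
    have hget : (PySem.Dict.mk ((k, v) :: rest)).get? k = some v := by
      rw [PySem.Dict.get?_mk_cons]; simp
    have hcongr : ∀ k' ∈ (PySem.Dict.mk rest).keys,
        (PySem.Dict.mk ((k, v) :: rest)).get? k' = (PySem.Dict.mk rest).get? k' := by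
      intro k' hm
      have hne : k ≠ k' := by
        intro he; subst he
        exact hk (by simpa [PySem.Dict.keys, List.mem_map] using hm)
      rw [PySem.Dict.get?_mk_cons]
      simp [hne]
    cases v with
    | none =>
      simp only [hkeys, pvALoop, hget, pvPairLoop]
      rw [pvALoop_congr _ _ _ _ _ hcongr]
      exact ih _ _ hnd'
    | some s =>
      simp only [hkeys, pvALoop, hget, pvPairLoop]
      rw [pvALoop_congr _ _ _ _ _ hcongr]
      exact ih _ _ hnd'

def pvParts (ps : List (String × Option String)) : List String :=
  ps.filterMap (fun kv => kv.2.map (fun v => kv.1 ++ "=" ++ v))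

theorem pvPairLoop_true (ps : List (String × Option String)) (url : String) :
    pvPairLoop ps url true = url ++ pvAmp (pvParts ps) := by
  induction ps generalizing url with
  | nil => simp [pvPairLoop, pvParts, pvAmp]
  | cons kv rest ih =>
    obtain ⟨k, v⟩ := kv
    cases v with
    | none => simpa [pvPairLoop, pvParts, List.filterMap_cons] using ih url
    | some s =>
      simp only [pvPairLoop, pvParts, List.filterMap_cons, Option.map_some, pvAmp]
      rw [ih]
      simp [pvParts, String.append_assoc]

theorem pvPairLoop_false (ps : List (String × Option String)) (url : String) :
    pvPairLoop ps url false =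
      match pvParts ps with
      | [] => url
      | p :: rest => url ++ "?" ++ p ++ pvAmp rest := by
  induction ps generalizing url with
  | nil => simp [pvPairLoop, pvParts]
  | cons kv rest ih =>
    obtain ⟨k, v⟩ := kv
    cases v with
    | none => simpa [pvPairLoop, pvParts, List.filterMap_cons] using ih url
    | some s =>
      simp only [pvPairLoop, pvParts, List.filterMap_cons, Option.map_some]
      rw [pvPairLoop_true]
      simp [pvParts, String.append_assoc]

theorem pvJoin_amp (p : String) (rest : List String) :
    PySem.Str.join "&" (p :: rest) = p ++ pvAmp rest := by
  induction rest generalizing p with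
  | nil =>
    apply String.toList_inj.mp
    simp [PySem.Str.toList_join, PySem.Chars.join_singleton, pvAmp]
  | cons q rest ih =>
    apply String.toList_inj.mp
    have h := congrArg String.toList (ih q)
    simp only [PySem.Str.toList_join, List.map_cons, PySem.Chars.join_cons_cons, pvAmp,
      String.toList_append] at h ⊢
    rw [← List.append_assoc, ← List.append_assoc]
    have hsep : ("&" : String).toList = ['&'] := rfl
    rw [h]
    simp

-- ===== VERDICT (by name: the statement is the Claim_ definition above) =====
theorem appendUrlWithQueryParameters_spec : Claim_equal_appendUrlWithQueryParameters := by
  intro url parameters _ hpre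
  unfold Spec_appendUrlWithQueryParameters appendUrlWithQueryParameters appendUrlWithQueryParameters_alt
  rw [pvALoop_eq_pairLoop _ _ _ hpre]
  show pvPairLoop parameters url (PySem.Str.isIn "?" url) = _
  cases hin : PySem.Str.isIn "?" url with
  | true =>
    rw [pvPairLoop_true]
    cases hp : pvParts parameters with
    | nil =>
      have : parameters.filterMap (fun kv => kv.2.map (fun v => kv.1 ++ "=" ++ v)) = [] := hp
      simp [this, pvAmp]
    | cons p rest =>
      have : parameters.filterMap (fun kv => kv.2.map (fun v => kv.1 ++ "=" ++ v)) = p :: rest := hp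
      simp only [this, pvAmp]
      rw [pvJoin_amp]
      simp [String.append_assoc]
  | false =>
    rw [pvPairLoop_false]
    cases hp : pvParts parameters with
    | nil =>
      have : parameters.filterMap (fun kv => kv.2.map (fun v => kv.1 ++ "=" ++ v)) = [] := hp
      simp [this]
    | cons p rest =>
      have : parameters.filterMap (fun kv => kv.2.map (fun v => kv.1 ++ "=" ++ v)) = p :: rest := hp
      simp only [this]
      rw [pvJoin_amp]
      simp [String.append_assoc]
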